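-- pv_equiv track=rewrite | github.com/michaelhollander/PhotoGrid | main.py | _calculate_layout_metrics
-- ===== SOURCE A (Python) =====
-- def _calculate_layout_metrics(rows_of_images, min_space):
--     layout_w = 0
--     layout_h = 0
--     total_photo_area = 0
--     current_y = 0
--     for row in rows_of_images:
--         row_height = max(img['height'] for img in row)
--         row_width = sum(img['width'] for img in row) + (len(row) - 1) * min_space if len(row) > 1 else sum(img['width'] for img in row)
--         layout_w = max(layout_w, row_width)
--         layout_h = current_y + row_height
--         current_y += row_height + min_space
--         total_photo_area += sum(img['width'] * img['height'] for img in row)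
--     return layout_w, layout_h, total_photo_area
-- ===== SOURCE B (Python) =====
-- def _calculate_layout_metrics(rows_of_images, min_space):
--     def go(rows):
--         if not rows:
--             return 0, 0, 0
--         row, rest = rows[0], rows[1:]
--         w = 0
--         h = row[0]['height']
--         a = 0
--         for img in row:
--             w += img['width']
--             if img['height'] > h:
--                 h = img['height']
--             a += img['width'] * img['height']
--         w += (len(row) - 1) * min_space
--         rw, rh, ra = go(rest)
--         return max(w, rw), (h if not rest else h + min_space + rh), a + ra
--     return go(rows_of_images)
-- ===== Notes on version B (the rewrite author's own statement) =====
-- stated objective: alternative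
-- what changed: Replaces A's single iterative loop with four running accumulators and three generator passes per row by a structural recursion over the rows that combines each row's metrics (computed in one fused pass per row, running max seeded from the first image) with the recursively computed metrics of the remaining rows.
import Mathlib
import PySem

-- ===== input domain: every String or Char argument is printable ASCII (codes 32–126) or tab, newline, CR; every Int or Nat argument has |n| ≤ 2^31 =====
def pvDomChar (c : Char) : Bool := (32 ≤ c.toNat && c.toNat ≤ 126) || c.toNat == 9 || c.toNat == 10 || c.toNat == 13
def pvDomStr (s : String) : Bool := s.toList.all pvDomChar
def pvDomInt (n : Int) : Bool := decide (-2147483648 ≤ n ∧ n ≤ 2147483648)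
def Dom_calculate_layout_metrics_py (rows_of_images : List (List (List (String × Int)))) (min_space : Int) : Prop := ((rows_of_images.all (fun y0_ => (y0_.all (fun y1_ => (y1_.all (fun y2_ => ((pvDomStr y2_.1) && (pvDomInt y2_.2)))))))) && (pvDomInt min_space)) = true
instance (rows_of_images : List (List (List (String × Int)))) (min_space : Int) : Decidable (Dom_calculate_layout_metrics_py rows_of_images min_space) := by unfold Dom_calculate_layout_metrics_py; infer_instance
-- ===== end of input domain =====

-- B replaces A's iterative loop over four running accumulators (three generator passes per row) by a
-- structural recursion over the rows, fusing each row's metrics into one pass (alternative decomposition, same cost).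
-- ===== PORT A =====
-- img['height'] / img['width']: first-match dict lookup; default 0 is only reached outside Pre_ (Python raises KeyError there)
def aGet (img : List (String × Int)) (k : String) : Int := (PySem.Dict.mk img).getD k 0

-- max(img['height'] for img in row); getD 0 only reached on an empty row (Python raises ValueError there, outside Pre_)
def aRowHeight (row : List (List (String × Int))) : Int :=
  (PySem.List.max? (row.map (fun img => aGet img "height")) (fun x => x)).getD 0

-- one iteration of A's for-loop on state (layout_w, layout_h, current_y, total_photo_area)
def aStep (min_space : Int) (st : Int × Int × Int × Int) (row : List (List (String × Int))) : Int × Int × Int × Int :=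
  let row_height := aRowHeight row
  let row_width := if 1 < row.length then (row.map (fun img => aGet img "width")).sum + ((row.length : Int) - 1) * min_space
                   else (row.map (fun img => aGet img "width")).sum
  (max st.1 row_width, st.2.2.1 + row_height, st.2.2.1 + row_height + min_space,
   st.2.2.2 + (row.map (fun img => aGet img "width" * aGet img "height")).sum)

def calculate_layout_metrics_py (rows_of_images : List (List (List (String × Int)))) (min_space : Int) : Int × Int × Int :=
  let st := rows_of_images.foldl (aStep min_space) (0, 0, 0, 0)
  (st.1, st.2.1, st.2.2.2)

-- ===== PORT B =====
def bGet (img : List (String × Int)) (k : String) : Int := (PySem.Dict.mk img).getD k 0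

-- B's fused per-row loop on state (w, h, a); h seeded from row[0]['height'] (empty row: Python B raises IndexError, outside Pre_)
def bRow (min_space : Int) (row : List (List (String × Int))) : Int × Int × Int :=
  let h0 := bGet ((PySem.List.pyGet? row 0).getD []) "height"
  let st := row.foldl (fun (s : Int × Int × Int) img =>
      (s.1 + bGet img "width",
       if bGet img "height" > s.2.1 then bGet img "height" else s.2.1,
       s.2.2 + bGet img "width" * bGet img "height")) (0, h0, 0)
  (st.1 + ((row.length : Int) - 1) * min_space, st.2.1, st.2.2)

-- B's recursion over the rows: combine the head row's metrics with the rest's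
def bGo (min_space : Int) : List (List (List (String × Int))) → Int × Int × Int
  | [] => (0, 0, 0)
  | row :: rest =>
    let rm := bRow min_space row
    let r := bGo min_space rest
    (max rm.1 r.1, if rest = [] then rm.2.1 else rm.2.1 + min_space + r.2.1, rm.2.2 + r.2.2)

def calculate_layout_metrics_py_alt (rows_of_images : List (List (List (String × Int)))) (min_space : Int) : Int × Int × Int :=
  bGo min_space rows_of_images

-- ===== PRECONDITION & SPEC =====
-- Pre_ excludes exactly the inputs where Python A raises: an empty row (ValueError from max on an empty
-- generator) or an image missing the 'height' or 'width' key (KeyError).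
def Pre_calculate_layout_metrics_py (rows_of_images : List (List (List (String × Int)))) (min_space : Int) : Prop :=
  ∀ row ∈ rows_of_images, row ≠ [] ∧ ∀ img ∈ row,
    ((PySem.Dict.mk img).get? "height").isSome = true ∧ ((PySem.Dict.mk img).get? "width").isSome = true
instance (rows_of_images : List (List (List (String × Int)))) (min_space : Int) : Decidable (Pre_calculate_layout_metrics_py rows_of_images min_space) := by unfold Pre_calculate_layout_metrics_py; infer_instance

def pvWitness_calculate_layout_metrics_py : (List (List (List (String × Int)))) × Int :=
  ([[[("width", 4), ("height", 3)], [("width", 2), ("height", 5)]], [[("width", 7), ("height", 1)]]], 2)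

def Spec_calculate_layout_metrics_py (rows_of_images : List (List (List (String × Int)))) (min_space : Int) (out : Int × Int × Int) : Prop := out = calculate_layout_metrics_py_alt rows_of_images min_space
instance (rows_of_images : List (List (List (String × Int)))) (min_space : Int) (out : Int × Int × Int) : Decidable (Spec_calculate_layout_metrics_py rows_of_images min_space out) := by unfold Spec_calculate_layout_metrics_py; infer_instance

-- ===== CLAIM (what is proved, stated in full; the proofs are below) =====
def Claim_equal_calculate_layout_metrics_py : Prop := ∀ (rows_of_images : List (List (List (String × Int)))) (min_space : Int), Dom_calculate_layout_metrics_py rows_of_images min_space → Pre_calculate_layout_metrics_py rows_of_images min_space → Spec_calculate_layout_metrics_py rows_of_images min_space (calculate_layout_metrics_py rows_of_images min_space)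

-- ===== LEMMAS AND PROOFS =====
-- A's running loop, characterised: final (w, h, y, t) from initial (w, h, y, t)
theorem aLoop_char (ms : Int) (rows : List (List (List (String × Int)))) :
    ∀ (w h y t : Int),
      rows.foldl (aStep ms) (w, h, y, t) =
        ((rows.map (fun row => if 1 < row.length then (row.map (fun img => aGet img "width")).sum + ((row.length : Int) - 1) * ms
                               else (row.map (fun img => aGet img "width")).sum)).foldl max w,
         if rows = [] then h else y + (rows.map aRowHeight).sum + ((rows.length : Int) - 1) * ms,
         y + (rows.map aRowHeight).sum + (rows.length : Int) * ms,
         t + (rows.map (fun row => (row.map (fun img => aGet img "width" * aGet img "height")).sum)).sum) := by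
  induction rows with
  | nil => intro w h y t; simp
  | cons r rs ih =>
      intro w h y t
      simp only [List.foldl_cons, aStep, List.map_cons, List.foldl_cons, List.sum_cons, List.length_cons]
      rw [ih]
      refine Prod.ext rfl (Prod.ext ?_ (Prod.ext ?_ ?_)) <;> simp only
      · rcases eq_or_ne rs [] with hrs | hrs
        · subst hrs; simp
        · simp only [hrs, if_neg (List.cons_ne_nil r rs)]
          push_cast; ring
      · push_cast; ring
      · ring

-- B's fused per-row loop, characterised componentwise
theorem bRowFold_char (row : List (List (String × Int))) :
    ∀ (w h a : Int),
      row.foldl (fun (s : Int × Int × Int) img =>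
        (s.1 + bGet img "width",
         if bGet img "height" > s.2.1 then bGet img "height" else s.2.1,
         s.2.2 + bGet img "width" * bGet img "height")) (w, h, a) =
      (w + (row.map (fun img => bGet img "width")).sum,
       (row.map (fun img => bGet img "height")).foldl max h,
       a + (row.map (fun img => bGet img "width" * bGet img "height")).sum) := by
  induction row with
  | nil => intro w h a; simp
  | cons i is ih =>
      intro w h a
      simp only [List.foldl_cons, List.map_cons, List.sum_cons, ih]
      refine Prod.ext (by ring) (Prod.ext ?_ (by simp only; ring))
      simp only
      congr 1
      rcases lt_or_ge h (bGet i "height") with hlt | hge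
      · rw [if_pos hlt, max_eq_right hlt.le]
      · rw [if_neg (not_lt.mpr hge), max_eq_left hge]

-- pulling an element out of a running max
theorem foldl_max_pull (l : List Int) : ∀ (x y : Int), l.foldl max (max x y) = max y (l.foldl max x) := by
  induction l with
  | nil => intro x y; simp [max_comm]
  | cons a t iht => intro x y; simp only [List.foldl_cons]; rw [max_right_comm x y a, iht]

-- on a nonempty row, B's fused loop yields A's three per-row aggregates
theorem bRow_char (ms : Int) (row : List (List (String × Int))) (hne : row ≠ []) :
    bRow ms row = ((row.map (fun img => aGet img "width")).sum + ((row.length : Int) - 1) * ms,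
                   aRowHeight row,
                   (row.map (fun img => aGet img "width" * aGet img "height")).sum) := by
  cases row with
  | nil => exact absurd rfl hne
  | cons i is =>
      show (let h0 := bGet ((PySem.List.pyGet? (i :: is) 0).getD []) "height"
            let st := (i :: is).foldl (fun (s : Int × Int × Int) img =>
              (s.1 + bGet img "width",
               if bGet img "height" > s.2.1 then bGet img "height" else s.2.1,
               s.2.2 + bGet img "width" * bGet img "height")) (0, h0, 0)
            (st.1 + (((i :: is).length : Int) - 1) * ms, st.2.1, st.2.2)) = _
      simp only [bRowFold_char]
      have hg : bGet = aGet := rfl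
      refine Prod.ext (by simp [hg]) (Prod.ext ?_ (by simp [hg]))
      unfold aRowHeight
      simp [PySem.List.pyGet?, PySem.List.pyIdx?, PySem.List.max?_id_cons, hg]

-- B's recursion, characterised against A's per-row aggregates (all rows nonempty)
theorem bGo_char (ms : Int) (rows : List (List (List (String × Int))))
    (hne : ∀ row ∈ rows, row ≠ []) :
    bGo ms rows =
      ((rows.map (fun row => (row.map (fun img => aGet img "width")).sum + ((row.length : Int) - 1) * ms)).foldl max 0,
       if rows = [] then 0 else (rows.map aRowHeight).sum + ((rows.length : Int) - 1) * ms,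
       (rows.map (fun row => (row.map (fun img => aGet img "width" * aGet img "height")).sum)).sum) := by
  induction rows with
  | nil => simp [bGo]
  | cons r rs ih =>
      have ihv := ih (fun row hrow => hne row (List.mem_cons_of_mem r hrow))
      have hr := bRow_char ms r (hne r List.mem_cons_self)
      simp only [bGo, ihv, hr, List.map_cons, List.foldl_cons, List.sum_cons, List.length_cons]
      refine Prod.ext ?_ (Prod.ext ?_ (by simp))
      · simp only
        rw [foldl_max_pull]
      · simp only [if_neg (List.cons_ne_nil r rs)]
        rcases eq_or_ne rs [] with h | h
        · subst h; simp
        · simp only [if_neg h]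
          cases rs with
          | nil => exact absurd rfl h
          | cons a t => push_cast; ring

theorem calculate_layout_metrics_py_spec : Claim_equal_calculate_layout_metrics_py := by
  intro rows ms _hdom hpre
  unfold Spec_calculate_layout_metrics_py calculate_layout_metrics_py calculate_layout_metrics_py_alt
  rw [aLoop_char, bGo_char ms rows (fun row hrow => (hpre row hrow).1)]
  have hw : rows.map (fun row => if 1 < row.length then (row.map (fun img => aGet img "width")).sum + ((row.length : Int) - 1) * ms
                                 else (row.map (fun img => aGet img "width")).sum)
          = rows.map (fun row => (row.map (fun img => aGet img "width")).sum + ((row.length : Int) - 1) * ms) := by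
    refine List.map_congr_left (fun row hrow => ?_)
    have hne : row ≠ [] := (hpre row hrow).1
    split_ifs with h
    · rfl
    · have h1 : row.length = 1 := by
        cases row with
        | nil => exact absurd rfl hne
        | cons a l => simp at h ⊢; omega
      simp [h1]
  simp only [hw]
  rcases eq_or_ne rows [] with h | h
  · subst h; simp
  · simp [h]
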